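-- pv_equiv track=rewrite | github.com/harmonic-resonance/chordulator | src/harmonic_resonance/chordulator/chordulator.py | parse_csml_chord_table
-- ===== SOURCE A (Python) =====
-- def parse_csml_chord_table(csml):
--     lines = csml.strip().split("\n")
--     chord_table = {}
--     current_section = None
--
--     for line in lines:
--         line = line.strip()
--         if line.startswith("*"):
--             current_section = line[1:].strip()
--             chord_table[current_section] = []
--         elif line.startswith("|"):
--             bars = line[1:].split("|")
--             chords = [bar.split() for bar in bars]
--             chord_table[current_section].extend([chords])
--
--     return chord_table
-- ===== SOURCE B (Python) =====
-- def parse_csml_chord_table(csml):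
--     # Two-phase: (1) partition stripped lines into (section, body-lines) blocks, (2) map each block to its chord table.
--     lines = [ln.strip() for ln in csml.strip().split("\n")]
--     blocks = []
--     i, n = 0, len(lines)
--     while i < n:
--         if lines[i].startswith("*"):
--             j = i + 1
--             while j < n and not lines[j].startswith("*"):
--                 j += 1
--             blocks.append((lines[i][1:].strip(),
--                            [l for l in lines[i + 1:j] if l.startswith("|")]))
--             i = j
--         else:
--             i += 1
--     table = {}
--     for name, body in blocks:
--         table[name] = [[bar.split() for bar in l[1:].split("|")] for l in body]
--     return table
-- ===== Notes on version B (the rewrite author's own statement) =====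
-- stated objective: alternative
-- what changed: A's single stateful scan (current-section variable, dict mutated per line) is replaced by a two-phase decomposition: first partition the stripped lines into (section name, chord-line) blocks at the '*' boundaries, then build the table by mapping each block's lines through the bar/chord split.
import Mathlib
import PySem

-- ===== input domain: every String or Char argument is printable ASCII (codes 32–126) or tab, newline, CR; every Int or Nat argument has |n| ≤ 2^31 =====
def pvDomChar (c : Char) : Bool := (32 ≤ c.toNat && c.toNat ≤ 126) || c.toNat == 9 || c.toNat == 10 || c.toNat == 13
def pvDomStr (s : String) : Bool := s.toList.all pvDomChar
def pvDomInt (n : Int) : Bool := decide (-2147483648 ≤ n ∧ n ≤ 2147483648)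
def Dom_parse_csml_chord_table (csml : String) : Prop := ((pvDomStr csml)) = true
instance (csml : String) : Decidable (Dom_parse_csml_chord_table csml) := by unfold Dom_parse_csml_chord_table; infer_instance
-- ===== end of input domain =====

-- B re-decomposes A's one stateful scan into two phases (partition the stripped lines into section blocks,
-- then map each block to its chord table); return values agree wherever A does not raise (alternative decomposition).

-- ===== PORT A =====
-- [bar.split() for bar in line[1:].split("|")]
def pvChordsA (line : String) : List (List String) :=
  ((PySem.Str.split? (PySem.Str.slice line (some 1) none) "|").getD []).map PySem.Str.split₀

-- one iteration of A's for-loop, state = (chord_table, current_section)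
def pvStepA (st : PySem.Dict String (List (List (List String))) × Option String) (line0 : String) :
    PySem.Dict String (List (List (List String))) × Option String :=
  let line := PySem.Str.strip line0
  if PySem.Str.startswith line "*" then
    let cur := PySem.Str.strip (PySem.Str.slice line (some 1) none)
    (st.1.insert cur [], some cur)
  else if PySem.Str.startswith line "|" then
    match st.2 with
    | some c => (st.1.modify c [] (· ++ [pvChordsA line]), st.2)
    | none => st  -- Python raises KeyError(None) here; such inputs are excluded by Pre_
  else st

def parse_csml_chord_table (csml : String) : List (String × List (List (List String))) :=
  ((((PySem.Str.split? (PySem.Str.strip csml) "\n").getD []).foldl pvStepA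
      (PySem.Dict.empty, none)).1).items

-- ===== PORT B =====
-- [[bar.split() for bar in l[1:].split("|")] for l in body]'s per-line part
def pvChordLine (l : String) : List (List String) :=
  ((PySem.Str.split? (PySem.Str.slice l (some 1) none) "|").getD []).map PySem.Str.split₀

def pvNotStar (l : String) : Bool := !PySem.Str.startswith l "*"

-- phase 1 of Source B: partition the stripped lines into (section name, its "|" lines) blocks;
-- Source B's inner `while j < n and not lines[j].startswith("*")` scan is the takeWhile/dropWhile split at the
-- next "*" line; the fuel argument (always ≥ list length) only makes the recursion structural for the kernel
def pvBlocksF : Nat → List String → List (String × List String)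
  | 0, _ => []
  | _ + 1, [] => []
  | fuel + 1, l :: ls =>
    if PySem.Str.startswith l "*" then
      (PySem.Str.strip (PySem.Str.slice l (some 1) none),
        (ls.takeWhile pvNotStar).filter (fun x => PySem.Str.startswith x "|"))
        :: pvBlocksF fuel (ls.dropWhile pvNotStar)
    else pvBlocksF fuel ls

def pvBlocks (ls : List String) : List (String × List String) := pvBlocksF ls.length ls

def parse_csml_chord_table_alt (csml : String) : List (String × List (List (List String))) :=
  let lines := ((PySem.Str.split? (PySem.Str.strip csml) "\n").getD []).map PySem.Str.strip
  ((pvBlocks lines).foldl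
      (fun (d : PySem.Dict String (List (List (List String)))) b =>
        d.insert b.1 (b.2.map pvChordLine))
      PySem.Dict.empty).items

-- ===== PRECONDITION & SPEC =====
-- Pre_ excludes exactly the inputs where some "|" line precedes every "*" line: there A raises KeyError(None).
def Pre_parse_csml_chord_table (csml : String) : Prop :=
  ∀ l ∈ (((PySem.Str.split? (PySem.Str.strip csml) "\n").getD []).map PySem.Str.strip).takeWhile pvNotStar,
    PySem.Str.startswith l "|" = false
instance (csml : String) : Decidable (Pre_parse_csml_chord_table csml) := by
  unfold Pre_parse_csml_chord_table; infer_instance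

def pvWitness_parse_csml_chord_table : String := "*A\n|C G|Em\n| D"

def Spec_parse_csml_chord_table (csml : String) (out : List (String × List (List (List String)))) : Prop :=
  out = parse_csml_chord_table_alt csml
instance (csml : String) (out : List (String × List (List (List String)))) : Decidable (Spec_parse_csml_chord_table csml out) := by
  unfold Spec_parse_csml_chord_table; infer_instance

-- ===== CLAIM (what is proved, stated in full; the proofs are below) =====
def Claim_equal_parse_csml_chord_table : Prop := ∀ (csml : String), Dom_parse_csml_chord_table csml → Pre_parse_csml_chord_table csml → Spec_parse_csml_chord_table csml (parse_csml_chord_table csml)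

-- ===== LEMMAS AND PROOFS =====

-- A's loop step on an already-stripped line (pvStepA strips first, then does exactly this)
def pvStepA0 (st : PySem.Dict String (List (List (List String))) × Option String) (line : String) :
    PySem.Dict String (List (List (List String))) × Option String :=
  if PySem.Str.startswith line "*" then
    (st.1.insert (PySem.Str.strip (PySem.Str.slice line (some 1) none)) [],
      some (PySem.Str.strip (PySem.Str.slice line (some 1) none)))
  else if PySem.Str.startswith line "|" then
    match st.2 with
    | some c => (st.1.modify c [] (· ++ [pvChordsA line]), st.2)
    | none => st
  else st

theorem pvStepA_eq : pvStepA = fun st l => pvStepA0 st (PySem.Str.strip l) := rfl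

-- B's phase-2 fold, named for the proofs
def pvFoldB (d : PySem.Dict String (List (List (List String)))) (bs : List (String × List String)) :
    PySem.Dict String (List (List (List String))) :=
  bs.foldl (fun d b => d.insert b.1 (b.2.map pvChordLine)) d

def pvBody (ls : List String) : List String :=
  (ls.takeWhile pvNotStar).filter (fun x => PySem.Str.startswith x "|")

-- the fuel argument is irrelevant as long as it is at least the list length
theorem pvBlocksF_congr : ∀ (f1 f2 : Nat) (ls : List String), ls.length ≤ f1 → ls.length ≤ f2 →
    pvBlocksF f1 ls = pvBlocksF f2 ls := by
  intro f1
  induction f1 with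
  | zero =>
    intro f2 ls h1 _
    have : ls = [] := List.length_eq_zero_iff.mp (Nat.le_zero.mp h1)
    subst this
    cases f2 <;> rfl
  | succ f1 ih =>
    intro f2 ls h1 h2
    cases ls with
    | nil => cases f2 <;> rfl
    | cons l ls =>
      cases f2 with
      | zero => exact absurd h2 (by simp)
      | succ f2 =>
        simp only [pvBlocksF]
        have hd := List.length_dropWhile_le pvNotStar ls
        have hl : ls.length + 1 ≤ f1 + 1 := h1
        have hl2 : ls.length + 1 ≤ f2 + 1 := h2
        by_cases hstar : PySem.Str.startswith l "*" = true
        · rw [if_pos hstar, if_pos hstar,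
            ih f2 (ls.dropWhile pvNotStar) (by omega) (by omega)]
        · rw [if_neg hstar, if_neg hstar, ih f2 ls (by omega) (by omega)]

theorem pvBlocks_nil : pvBlocks [] = [] := rfl

theorem pvBlocks_cons (l : String) (ls : List String) :
    pvBlocks (l :: ls) =
      if PySem.Str.startswith l "*" then
        (PySem.Str.strip (PySem.Str.slice l (some 1) none), pvBody ls) :: pvBlocks (ls.dropWhile pvNotStar)
      else pvBlocks ls := by
  show pvBlocksF (ls.length + 1) (l :: ls) = _
  rw [pvBlocksF]
  by_cases hstar : PySem.Str.startswith l "*" = true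
  · rw [if_pos hstar, if_pos hstar, pvBody, pvBlocks,
      pvBlocksF_congr ls.length (ls.dropWhile pvNotStar).length (ls.dropWhile pvNotStar)
        (List.length_dropWhile_le pvNotStar ls) le_rfl]
  · rw [if_neg hstar, if_neg hstar, pvBlocks]

-- re-inserting a present key with its own value is a no-op (keys unique)
theorem pv_insert_getD_self {κ ν : Type} [BEq κ] [LawfulBEq κ] (d : PySem.Dict κ ν) (k : κ) (d0 : ν)
    (hc : d.contains k = true) (hnd : d.keys.Nodup) : d.insert k (d.getD k d0) = d := by
  apply PySem.Dict.ext
  rw [PySem.Dict.items_insert_of_contains _ _ hc]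
  conv_rhs => rw [← List.map_id d.items]
  apply List.map_congr_left
  intro p hp
  by_cases h : p.1 = k
  · have hmem : (k, p.2) ∈ d.items := by rw [← h, Prod.mk.eta]; exact hp
    have hv : d.getD k d0 = p.2 := PySem.Dict.getD_of_mem_items d hmem hnd d0
    have hb : (p.1 == k) = true := by simp [h]
    rw [if_pos hb, hv, ← h, Prod.mk.eta]
    rfl
  · have hb : (p.1 == k) = false := by simp [h]
    rw [if_neg (by simp [hb])]
    rfl

theorem pv_modify_nil_self (d : PySem.Dict String (List (List (List String)))) (c : String)
    (hc : d.contains c = true) (hnd : d.keys.Nodup) :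
    d.modify c [] (· ++ ([] : List (List (List String)))) = d := by
  show d.insert c (d.getD c [] ++ []) = d
  rw [List.append_nil]
  exact pv_insert_getD_self d c [] hc hnd

theorem pv_insert_modify (d : PySem.Dict String (List (List (List String)))) (n : String)
    (r : List (List (List String))) :
    (d.insert n []).modify n [] (· ++ r) = d.insert n r := by
  show (d.insert n []).insert n ((d.insert n []).getD n [] ++ r) = d.insert n r
  rw [PySem.Dict.getD_insert_self, PySem.Dict.insert_insert_self, List.nil_append]

theorem pv_modify_modify (d : PySem.Dict String (List (List (List String)))) (c : String)
    (x : List (List String)) (r : List (List (List String))) :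
    (d.modify c [] (· ++ [x])).modify c [] (· ++ r) = d.modify c [] (· ++ ([x] ++ r)) := by
  show (d.insert c (d.getD c [] ++ [x])).insert c
      ((d.insert c (d.getD c [] ++ [x])).getD c [] ++ r) = d.insert c (d.getD c [] ++ ([x] ++ r))
  rw [PySem.Dict.getD_insert_self, PySem.Dict.insert_insert_self, List.append_assoc]

-- the invariant of A's loop once a section is open: the rest of the scan appends this
-- block's chord lines to the current key, then proceeds block by block
theorem pv_fold_some (ls : List String) : ∀ (d : PySem.Dict String (List (List (List String)))) (c : String),
    d.contains c = true → d.keys.Nodup →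
    (ls.foldl pvStepA0 (d, some c)).1 =
      pvFoldB (d.modify c [] (· ++ (pvBody ls).map pvChordLine)) (pvBlocks (ls.dropWhile pvNotStar)) := by
  induction ls with
  | nil =>
    intro d c hc hnd
    simp only [List.foldl_nil, List.dropWhile_nil, pvBlocks_nil, pvFoldB, pvBody,
      List.takeWhile_nil, List.filter_nil, List.map_nil]
    exact (pv_modify_nil_self d c hc hnd).symm
  | cons l ls ih =>
    intro d c hc hnd
    rw [List.foldl_cons]
    by_cases hstar : PySem.Str.startswith l "*" = true
    · have hstar' : PySem.Chars.startswith l.toList ['*'] = true := by simpa using hstar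
      have hns : pvNotStar l = false := by simp [pvNotStar, hstar']
      have hstep : pvStepA0 (d, some c) l =
          (d.insert (PySem.Str.strip (PySem.Str.slice l (some 1) none)) [],
            some (PySem.Str.strip (PySem.Str.slice l (some 1) none))) := by
        simp [pvStepA0, hstar']
      rw [hstep, ih _ _ (PySem.Dict.contains_insert_self d _ _) (PySem.Dict.nodup_keys_insert d _ _ hnd),
        pv_insert_modify]
      rw [List.dropWhile_cons_of_neg (by simp [hns]), pvBlocks_cons, if_pos hstar]
      have hbody : pvBody (l :: ls) = [] := by
        simp [pvBody, hns]
      rw [hbody]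
      simp only [List.map_nil]
      rw [pv_modify_nil_self d c hc hnd]
      simp only [pvFoldB, List.foldl_cons]
    · have hstar' : PySem.Chars.startswith l.toList ['*'] = false := by
        simpa using (Bool.not_eq_true _).mp hstar
      have hns : pvNotStar l = true := by simp [pvNotStar, hstar']
      by_cases hbar : PySem.Str.startswith l "|" = true
      · have hbar' : PySem.Chars.startswith l.toList ['|'] = true := by simpa using hbar
        have hstep : pvStepA0 (d, some c) l = (d.modify c [] (· ++ [pvChordsA l]), some c) := by
          simp [pvStepA0, hstar', hbar']
        have hc' : (d.modify c [] (· ++ [pvChordsA l])).contains c = true :=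
          PySem.Dict.contains_insert_self d _ _
        have hnd' : (d.modify c [] (· ++ [pvChordsA l])).keys.Nodup :=
          PySem.Dict.nodup_keys_insert d _ _ hnd
        rw [hstep, ih _ _ hc' hnd', pv_modify_modify]
        have hbody : pvBody (l :: ls) = l :: pvBody ls := by
          simp [pvBody, hns, hbar']
        rw [List.dropWhile_cons_of_pos hns, hbody]
        rfl
      · have hbar' : PySem.Chars.startswith l.toList ['|'] = false := by
          simpa using (Bool.not_eq_true _).mp hbar
        have hstep : pvStepA0 (d, some c) l = (d, some c) := by
          simp [pvStepA0, hstar', hbar']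
        rw [hstep, ih _ _ hc hnd]
        have hbody : pvBody (l :: ls) = pvBody ls := by
          simp [pvBody, hns, hbar']
        rw [List.dropWhile_cons_of_pos hns, hbody]

-- before the first section line A only skips lines; under Pre_ no "|" line occurs there
theorem pv_fold_none (ls : List String) : ∀ (d : PySem.Dict String (List (List (List String)))),
    d.keys.Nodup →
    (∀ l ∈ ls.takeWhile pvNotStar, PySem.Str.startswith l "|" = false) →
    (ls.foldl pvStepA0 (d, none)).1 = pvFoldB d (pvBlocks ls) := by
  induction ls with
  | nil => intro d _ _; simp [pvBlocks_nil, pvFoldB]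
  | cons l ls ih =>
    intro d hnd hpre
    rw [List.foldl_cons, pvBlocks_cons]
    by_cases hstar : PySem.Str.startswith l "*" = true
    · have hstar' : PySem.Chars.startswith l.toList ['*'] = true := by simpa using hstar
      have hstep : pvStepA0 (d, none) l =
          (d.insert (PySem.Str.strip (PySem.Str.slice l (some 1) none)) [],
            some (PySem.Str.strip (PySem.Str.slice l (some 1) none))) := by
        simp [pvStepA0, hstar']
      rw [hstep, pv_fold_some ls _ _ (PySem.Dict.contains_insert_self d _ _)
        (PySem.Dict.nodup_keys_insert d _ _ hnd), pv_insert_modify, if_pos hstar]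
      simp only [pvFoldB, List.foldl_cons]
    · have hstar' : PySem.Chars.startswith l.toList ['*'] = false := by
        simpa using (Bool.not_eq_true _).mp hstar
      have hns : pvNotStar l = true := by simp [pvNotStar, hstar']
      have hbar : PySem.Str.startswith l "|" = false := by
        apply hpre
        rw [List.takeWhile_cons_of_pos hns]
        exact List.mem_cons_self
      have hbar' : PySem.Chars.startswith l.toList ['|'] = false := by simpa using hbar
      have hstep : pvStepA0 (d, none) l = (d, none) := by
        simp [pvStepA0, hstar', hbar']
      rw [hstep, if_neg hstar, ih d hnd]
      intro x hx
      apply hpre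
      rw [List.takeWhile_cons_of_pos hns]
      exact List.mem_cons_of_mem l hx

-- ===== VERDICT (by name: the statement is the Claim_ definition above) =====
theorem parse_csml_chord_table_spec : Claim_equal_parse_csml_chord_table := by
  intro csml _ hpre
  unfold Spec_parse_csml_chord_table parse_csml_chord_table parse_csml_chord_table_alt
  rw [pvStepA_eq, ← List.foldl_map]
  rw [pv_fold_none _ PySem.Dict.empty (by simp [PySem.Dict.keys, PySem.Dict.empty]) hpre]
  rfl
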